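-- pv_equiv track=rewrite | github.com/EasyByteRu/AdsAI | examples/steps_demand_gen/step8.py | _ensure_suffix_basics
-- ===== SOURCE A (Python) =====
-- from typing import Any, Callable, Dict, Iterable, List, Optional, Tuple
--
-- def _ensure_suffix_basics(suffix: str, campaign_slug: str) -> str:
--     parts: List[tuple[str, str]] = []
--     seen: set[str] = set()
--     for part in (suffix.split("&") if suffix else []):
--         if "=" not in part:
--             continue
--         key, val = part.split("=", 1)
--         key = key.strip()
--         val = val.strip()
--         if not key or not val:
--             continue
--         lower = key.lower()
--         if lower in seen:
--             continue
--         parts.append((key, val))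
--         seen.add(lower)
--
--     def append_if_missing(key: str, value: str) -> None:
--         lower = key.lower()
--         if lower not in seen:
--             parts.append((key, value))
--             seen.add(lower)
--
--     append_if_missing("utm_source", "google")
--     append_if_missing("utm_medium", "demand_gen")
--     append_if_missing("utm_campaign", f"{campaign_slug}_{{campaignid}}")
--
--     return "&".join(f"{key}={value}" for key, value in parts)
-- ===== SOURCE B (Python) =====
-- def _dedup(pairs):
--     # Recursive sieve: keep the head, drop every later pair with the same
--     # lowercased key, recurse on what remains. First occurrence wins, order kept.
--     if not pairs:
--         return []
--     (k, v), rest = pairs[0], pairs[1:]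
--     low = k.lower()
--     return [(k, v)] + _dedup([p for p in rest if p[0].lower() != low])
--
--
-- def _ensure_suffix_basics(suffix: str, campaign_slug: str) -> str:
--     candidates = []
--     for part in (suffix.split("&") if suffix else []):
--         if "=" in part:
--             k, v = part.split("=", 1)
--             k, v = k.strip(), v.strip()
--             if k and v:
--                 candidates.append((k, v))
--     candidates += [
--         ("utm_source", "google"),
--         ("utm_medium", "demand_gen"),
--         ("utm_campaign", f"{campaign_slug}_{{campaignid}}"),
--     ]
--     return "&".join(f"{k}={v}" for k, v in _dedup(candidates))
-- ===== Notes on version B (the rewrite author's own statement) =====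
-- stated objective: alternative
-- what changed: Replaces A's stateful streaming dedup (a mutable seen-set consulted while parsing, plus a nested append_if_missing helper for the defaults) by a stateless recursive sieve: parse all pairs, chain on the three defaults, then dedup by keeping the head and recursively filtering every later pair with the same lowercased key out of the tail.
import Mathlib
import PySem

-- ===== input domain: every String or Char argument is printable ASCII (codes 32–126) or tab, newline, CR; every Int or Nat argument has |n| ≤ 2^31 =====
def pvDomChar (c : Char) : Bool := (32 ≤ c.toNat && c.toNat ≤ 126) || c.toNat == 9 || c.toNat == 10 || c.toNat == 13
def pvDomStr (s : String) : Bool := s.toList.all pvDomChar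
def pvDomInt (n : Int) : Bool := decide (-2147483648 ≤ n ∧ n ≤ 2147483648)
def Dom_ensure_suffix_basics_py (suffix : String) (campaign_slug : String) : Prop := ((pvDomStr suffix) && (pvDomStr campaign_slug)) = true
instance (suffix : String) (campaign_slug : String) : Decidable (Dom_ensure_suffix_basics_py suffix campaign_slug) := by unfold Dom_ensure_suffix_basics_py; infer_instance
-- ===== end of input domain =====

-- B replaces A's stateful streaming dedup (mutable seen-set consulted while parsing,
-- nested append_if_missing helper) by a stateless recursive sieve over the chained
-- candidate list (parsed pairs ++ defaults) — an alternative decomposition, same result.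


-- ===== PORT A =====
-- A's loop body: parse one '&'-piece and dedup it into the (parts, seen) state on the fly.
def pvAStep (st : List (String × String) × PySem.Set String) (part : String) :
    List (String × String) × PySem.Set String :=
  if PySem.Str.isIn "=" part then
    match PySem.Str.splitMax? part "=" 1 with
    | some [k0, v0] =>
      let key := PySem.Str.strip k0
      let val := PySem.Str.strip v0
      if key = "" ∨ val = "" then st
      else
        let lower := PySem.Str.lower key
        if PySem.Set.contains st.2 lower then st
        else (st.1 ++ [(key, val)], PySem.Set.add st.2 lower)
    | _ => st   -- unreachable: split("=", 1) with "=" present yields exactly two pieces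
  else st

-- A's nested helper append_if_missing
def pvAppendIfMissing (st : List (String × String) × PySem.Set String)
    (key value : String) : List (String × String) × PySem.Set String :=
  let lower := PySem.Str.lower key
  if PySem.Set.contains st.2 lower then st
  else (st.1 ++ [(key, value)], PySem.Set.add st.2 lower)

def ensure_suffix_basics_py (suffix : String) (campaign_slug : String) : String :=
  let parts0 : List String :=
    if suffix ≠ "" then (PySem.Str.split? suffix "&").getD [] else []
  let st := parts0.foldl pvAStep ([], PySem.Set.empty)
  let st := pvAppendIfMissing st "utm_source" "google"
  let st := pvAppendIfMissing st "utm_medium" "demand_gen"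
  let st := pvAppendIfMissing st "utm_campaign" (campaign_slug ++ "_{campaignid}")
  PySem.Str.join "&" (st.1.map (fun p => p.1 ++ "=" ++ p.2))

-- ===== PORT B =====
-- B's parse-loop body: append the well-formed stripped pair, no dedup state.
def pvParseStep (acc : List (String × String)) (part : String) : List (String × String) :=
  if PySem.Str.isIn "=" part then
    match PySem.Str.splitMax? part "=" 1 with
    | some [k0, v0] =>
      let k := PySem.Str.strip k0
      let v := PySem.Str.strip v0
      if k ≠ "" ∧ v ≠ "" then acc ++ [(k, v)] else acc
    | _ => acc   -- unreachable, as above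
  else acc

-- B's recursive sieve: keep the head, filter its lowercased key out of the tail, recurse.
def pvSieve : List (String × String) → List (String × String)
  | [] => []
  | c :: rest =>
      c :: pvSieve (rest.filter (fun p => PySem.Str.lower p.1 != PySem.Str.lower c.1))
termination_by l => l.length
decreasing_by
  simp only [List.length_cons, List.length_unattach]
  exact Nat.lt_succ_of_le (le_trans (List.length_filter_le _ _) (by simp))

def ensure_suffix_basics_py_alt (suffix : String) (campaign_slug : String) : String :=
  let candidates : List (String × String) :=
    (if suffix ≠ "" then (PySem.Str.split? suffix "&").getD [] else []).foldl pvParseStep []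
      ++ [("utm_source", "google"), ("utm_medium", "demand_gen"),
          ("utm_campaign", campaign_slug ++ "_{campaignid}")]
  PySem.Str.join "&" ((pvSieve candidates).map (fun p => p.1 ++ "=" ++ p.2))

-- ===== PRECONDITION & SPEC =====
def Spec_ensure_suffix_basics_py (suffix : String) (campaign_slug : String) (out : String) : Prop := out = ensure_suffix_basics_py_alt suffix campaign_slug
instance (suffix : String) (campaign_slug : String) (out : String) : Decidable (Spec_ensure_suffix_basics_py suffix campaign_slug out) := by unfold Spec_ensure_suffix_basics_py; infer_instance

-- ===== CLAIM (what is proved, stated in full; the proofs are below) =====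
def Claim_equal_ensure_suffix_basics_py : Prop := ∀ (suffix : String) (campaign_slug : String), Dom_ensure_suffix_basics_py suffix campaign_slug → Spec_ensure_suffix_basics_py suffix campaign_slug (ensure_suffix_basics_py suffix campaign_slug)

-- ===== LEMMAS AND PROOFS =====

-- B's parse step only appends on the right
theorem pvParseStep_append (acc : List (String × String)) (part : String) :
    pvParseStep acc part = acc ++ pvParseStep [] part := by
  unfold pvParseStep
  cases h : PySem.Str.isIn "=" part with
  | false => simp [h]
  | true =>
    simp only [if_true]
    cases hs : PySem.Str.splitMax? part "=" 1 with
    | none => simp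
    | some l =>
      match l with
      | [] => simp
      | [a] => simp
      | [a, b] =>
        by_cases hk : PySem.Str.strip a = "" <;> by_cases hv : PySem.Str.strip b = "" <;>
          simp [hk, hv]
      | a :: b :: c :: rest => simp

-- A's fused step = append-if-missing folded over B's parse of the piece
theorem pvAStep_eq (st : List (String × String) × PySem.Set String) (part : String) :
    pvAStep st part = (pvParseStep [] part).foldl (fun st p => pvAppendIfMissing st p.1 p.2) st := by
  unfold pvAStep pvParseStep pvAppendIfMissing
  cases h : PySem.Str.isIn "=" part with
  | false => simp [h]
  | true =>
    simp only [if_true]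
    cases hs : PySem.Str.splitMax? part "=" 1 with
    | none => simp
    | some l =>
      match l with
      | [] => simp
      | [a] => simp
      | [a, b] =>
        by_cases hk : PySem.Str.strip a = "" <;> by_cases hv : PySem.Str.strip b = "" <;>
          simp [hk, hv, or_comm]
      | a :: b :: c :: rest => simp

-- B's parse loop only appends on the right
theorem pvParse_acc (ps : List String) :
    ∀ (acc : List (String × String)), ps.foldl pvParseStep acc = acc ++ ps.foldl pvParseStep [] := by
  induction ps with
  | nil => simp
  | cons p rest ih =>
    intro acc
    rw [List.foldl_cons, ih, pvParseStep_append, List.foldl_cons,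
        ih (pvParseStep [] p), List.append_assoc]

-- A's whole parse loop = append-if-missing folded over B's parsed candidate list
theorem pvFoldA_eq (ps : List String) (st : List (String × String) × PySem.Set String) :
    ps.foldl pvAStep st =
      (ps.foldl pvParseStep []).foldl (fun st p => pvAppendIfMissing st p.1 p.2) st := by
  induction ps generalizing st with
  | nil => rfl
  | cons part rest ih =>
    rw [List.foldl_cons, List.foldl_cons, pvAStep_eq, ih,
        pvParse_acc rest (pvParseStep [] part), List.foldl_append]

-- the sieve invariant: the append-if-missing fold's pair list is the sieve of the
-- candidates whose lowercased keys are not yet seen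
theorem pvInv (cs : List (String × String)) (pairs : List (String × String))
    (seen : PySem.Set String) :
    (cs.foldl (fun st p => pvAppendIfMissing st p.1 p.2) (pairs, seen)).1 =
      pairs ++ pvSieve (cs.filter (fun p => !(PySem.Set.contains seen (PySem.Str.lower p.1)))) := by
  induction cs generalizing pairs seen with
  | nil => simp [pvSieve]
  | cons c rest ih =>
    rw [List.foldl_cons, List.filter_cons]
    by_cases h : PySem.Set.contains seen (PySem.Str.lower c.1) = true
    · have hstep : pvAppendIfMissing (pairs, seen) c.1 c.2 = (pairs, seen) := by
        simp only [pvAppendIfMissing]; rw [if_pos h]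
      rw [hstep, ih, h]
      simp
    · have hstep : pvAppendIfMissing (pairs, seen) c.1 c.2
          = (pairs ++ [c], PySem.Set.add seen (PySem.Str.lower c.1)) := by
        simp only [pvAppendIfMissing]; rw [if_neg h]
      have hc0 : PySem.Set.contains seen (PySem.Str.lower c.1) = false :=
        Bool.eq_false_iff.mpr h
      have hb : (!PySem.Set.contains seen (PySem.Str.lower c.1)) = true := by
        rw [hc0]; rfl
      rw [hstep, ih, hb, if_pos rfl]
      have hfilter :
          rest.filter (fun p => !(PySem.Set.contains (PySem.Set.add seen (PySem.Str.lower c.1)) (PySem.Str.lower p.1))) =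
          (rest.filter (fun p => !(PySem.Set.contains seen (PySem.Str.lower p.1)))).filter
            (fun p => PySem.Str.lower p.1 != PySem.Str.lower c.1) := by
        rw [List.filter_filter]
        apply List.filter_congr
        intro p _
        by_cases hc : PySem.Str.lower p.1 = PySem.Str.lower c.1
        · simp [hc, PySem.Set.mem_add]
        · have : PySem.Set.contains (PySem.Set.add seen (PySem.Str.lower c.1)) (PySem.Str.lower p.1)
              = PySem.Set.contains seen (PySem.Str.lower p.1) := by
            by_cases hm : PySem.Str.lower p.1 ∈ seen
            · simp [hm, PySem.Set.mem_add]
            · simp [hm, PySem.Set.mem_add, hc]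
          simp [hc]
      rw [hfilter]
      conv_rhs => rw [pvSieve]
      simp

-- ===== VERDICT (by name: the statement is the Claim_ definition above) =====
theorem ensure_suffix_basics_py_spec : Claim_equal_ensure_suffix_basics_py := by
  unfold Claim_equal_ensure_suffix_basics_py
  intro suffix campaign_slug _
  simp only [Spec_ensure_suffix_basics_py, ensure_suffix_basics_py,
    ensure_suffix_basics_py_alt]
  rw [pvFoldA_eq]
  have trifold :
      ∀ (st : List (String × String) × PySem.Set String) (s : String),
        pvAppendIfMissing (pvAppendIfMissing (pvAppendIfMissing st "utm_source" "google")
            "utm_medium" "demand_gen") "utm_campaign" (s ++ "_{campaignid}")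
          = [("utm_source", "google"), ("utm_medium", "demand_gen"),
             ("utm_campaign", s ++ "_{campaignid}")].foldl
              (fun st p => pvAppendIfMissing st p.1 p.2) st := by
    intro st s; rfl
  rw [trifold, ← List.foldl_append, pvInv]
  have hall : ∀ (cs : List (String × String)),
      cs.filter (fun p => !(PySem.Set.contains PySem.Set.empty (PySem.Str.lower p.1))) = cs := by
    intro cs
    apply List.filter_eq_self.mpr
    intro p _
    simp [PySem.Set.empty]
  rw [hall]
  simp
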